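-- pv_equiv track=rewrite | github.com/Thif/aoc-2024 | code/day_9.py | get_empty_spots_list
-- ===== SOURCE A (Python) =====
-- def get_empty_spots_list(disk_layout_list):
--     empty_spots = []
--     start_index = None
--
--     for i, block in enumerate(disk_layout_list):
--         if block == ".":
--             if start_index is None:
--                 start_index = i
--         else:
--             if start_index is not None:
--                 empty_spots.append((start_index, i))
--                 start_index = None
--
--     if start_index is not None:
--         empty_spots.append((start_index, len(disk_layout_list)))
--
--     return empty_spots
-- ===== SOURCE B (Python) =====
-- def get_empty_spots_list(disk_layout_list):
--     # run-scanning with two index pointers instead of a start_index/None sentinel state machine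
--     res = []
--     i, n = 0, len(disk_layout_list)
--     while i < n:
--         j = i
--         while j < n and (disk_layout_list[j] == ".") == (disk_layout_list[i] == "."):
--             j += 1
--         if disk_layout_list[i] == ".":
--             res.append((i, j))
--         i = j
--     return res
-- ===== Notes on version B (the rewrite author's own statement) =====
-- stated objective: alternative
-- what changed: Replaces the start_index/None sentinel state machine with a two-pointer run scanner that consumes each maximal run of equal-emptiness blocks at once and emits (i, j) for '.'-runs directly.
import Mathlib
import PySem

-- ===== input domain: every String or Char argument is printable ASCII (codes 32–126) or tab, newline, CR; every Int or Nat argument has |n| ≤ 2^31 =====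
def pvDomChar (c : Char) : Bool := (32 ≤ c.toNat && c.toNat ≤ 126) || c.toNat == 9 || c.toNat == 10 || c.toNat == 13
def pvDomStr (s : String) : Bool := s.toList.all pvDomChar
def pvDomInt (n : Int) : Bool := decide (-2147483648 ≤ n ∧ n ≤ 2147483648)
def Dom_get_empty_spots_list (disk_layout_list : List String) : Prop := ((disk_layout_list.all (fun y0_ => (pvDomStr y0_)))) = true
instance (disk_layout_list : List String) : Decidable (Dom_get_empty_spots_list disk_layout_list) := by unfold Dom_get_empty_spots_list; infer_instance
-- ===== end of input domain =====

-- B replaces A's start_index/None sentinel state machine by a two-pointer run scanner; objective: alternative decomposition, same O(n) cost.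

-- ===== PORT A =====
-- A's for-loop over enumerate, carrying (empty_spots, start_index) and the running index
def pvLoopA : List String → Nat → List (Int × Int) → Option Int → List (Int × Int) × Option Int
  | [], _, es, si => (es, si)
  | block :: rest, i, es, si =>
    if block == "." then
      match si with
      | none => pvLoopA rest (i + 1) es (some (i : Int))
      | some _ => pvLoopA rest (i + 1) es si
    else
      match si with
      | some a => pvLoopA rest (i + 1) (es ++ [(a, (i : Int))]) none
      | none => pvLoopA rest (i + 1) es none

def get_empty_spots_list (disk_layout_list : List String) : List (Int × Int) :=
  let st := pvLoopA disk_layout_list 0 [] none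
  match st.2 with
  | some a => st.1 ++ [(a, (disk_layout_list.length : Int))]
  | none => st.1

-- ===== PORT B =====
-- inner while loop of B: length of the prefix of the remaining list whose "== '.'" status equals b
def pvSpan (b : Bool) : List String → Nat
  | [] => 0
  | x :: xs => if (x == ".") = b then 1 + pvSpan b xs else 0

-- outer while loop of B: consume one maximal run at a time, emit (i, j) for '.'-runs
def pvScan : List String → Nat → List (Int × Int)
  | [], _ => []
  | x :: xs, i =>
    let b := x == "."
    let n := 1 + pvSpan b xs
    let rest := pvScan (xs.drop (pvSpan b xs)) (i + n)
    if b then ((i : Int), ((i + n : Nat) : Int)) :: rest else rest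
termination_by l _ => l.length
decreasing_by simp [List.length_drop]

def get_empty_spots_list_alt (disk_layout_list : List String) : List (Int × Int) :=
  pvScan disk_layout_list 0

-- ===== PRECONDITION & SPEC =====
def Spec_get_empty_spots_list (disk_layout_list : List String) (out : List (Int × Int)) : Prop := out = get_empty_spots_list_alt disk_layout_list
instance (disk_layout_list : List String) (out : List (Int × Int)) : Decidable (Spec_get_empty_spots_list disk_layout_list out) := by unfold Spec_get_empty_spots_list; infer_instance

-- ===== CLAIM (what is proved, stated in full; the proofs are below) =====
def Claim_equal_get_empty_spots_list : Prop := ∀ (disk_layout_list : List String), Dom_get_empty_spots_list disk_layout_list → Spec_get_empty_spots_list disk_layout_list (get_empty_spots_list disk_layout_list)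

-- ===== LEMMAS AND PROOFS =====

-- finalize A's loop state with the total length (= current index + remaining length)
def pvFinish (st : List (Int × Int) × Option Int) (tot : Nat) : List (Int × Int) :=
  match st.2 with
  | some a => st.1 ++ [(a, (tot : Int))]
  | none => st.1

-- unfolding lemmas for pvScan (well-founded recursion)
theorem drop_one_add {a : Type} (n : Nat) (x : a) (l : List a) :
    List.drop (1 + n) (x :: l) = List.drop n l := by
  rw [Nat.add_comm]; simp

theorem pvScan_cons_dot (x : String) (xs : List String) (i : Nat) (h : (x == ".") = true) :
    pvScan (x :: xs) i
      = ((i : Int), ((i + (1 + pvSpan true xs) : Nat) : Int))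
          :: pvScan (xs.drop (pvSpan true xs)) (i + (1 + pvSpan true xs)) := by
  conv_lhs => unfold pvScan
  simp [h]

theorem pvScan_cons_nondot (x : String) (xs : List String) (i : Nat) (h : ¬ (x == ".") = true) :
    pvScan (x :: xs) i
      = pvScan (xs.drop (pvSpan false xs)) (i + (1 + pvSpan false xs)) := by
  conv_lhs => unfold pvScan
  simp [eq_false_of_ne_true h]

-- skipping a leading non-'.' run does not change pvScan's output
theorem pvScan_skip (xs : List String) (i : Nat) :
    pvScan xs i = pvScan (xs.drop (pvSpan false xs)) (i + pvSpan false xs) := by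
  cases xs with
  | nil => simp [pvSpan]
  | cons y ys =>
    by_cases h : (y == ".") = true
    · simp [pvSpan, h]
    · rw [pvScan_cons_nondot y ys i h]
      simp [pvSpan, eq_false_of_ne_true h, drop_one_add]

theorem pvLoop_main (l : List String) :
    (∀ (i : Nat) (es : List (Int × Int)),
        pvFinish (pvLoopA l i es none) (i + l.length) = es ++ pvScan l i)
    ∧ (∀ (i : Nat) (es : List (Int × Int)) (a : Int),
        pvFinish (pvLoopA l i es (some a)) (i + l.length)
          = es ++ ((a, ((i + pvSpan true l : Nat) : Int))
              :: pvScan (l.drop (pvSpan true l)) (i + pvSpan true l))) := by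
  induction l with
  | nil =>
    constructor
    · intro i es; simp [pvLoopA, pvFinish]; unfold pvScan; rfl
    · intro i es a
      simp [pvLoopA, pvFinish, pvSpan]; unfold pvScan; rfl
  | cons x xs ih =>
    obtain ⟨ihn, ihs⟩ := ih
    have hlen : ∀ i : Nat, i + (x :: xs).length = (i + 1) + xs.length := by
      intro i; simp [List.length_cons]; omega
    constructor
    · intro i es
      by_cases h : (x == ".") = true
      · rw [pvScan_cons_dot x xs i h]
        simp only [pvLoopA, h, if_true, hlen]
        rw [ihs]
        simp [pvSpan, h, drop_one_add]
        constructor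
        · push_cast; ring
        · congr 1; omega
      · rw [pvScan_cons_nondot x xs i h]
        simp only [pvLoopA, if_neg h, hlen]
        rw [ihn, pvScan_skip xs (i + 1)]
        simp [pvSpan, eq_false_of_ne_true h, drop_one_add]
        congr 1; omega
    · intro i es a
      by_cases h : (x == ".") = true
      · simp only [pvLoopA, h, if_true, hlen]
        rw [ihs]
        simp [pvSpan, h, drop_one_add]
        constructor
        · push_cast; ring
        · congr 1; omega
      · simp only [pvLoopA, if_neg h, hlen]
        rw [ihn, pvScan_skip xs (i + 1)]
        simp [pvSpan, eq_false_of_ne_true h, drop_one_add]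
        rw [pvScan_cons_nondot x xs i h]
        congr 1; omega

-- ===== VERDICT (by name: the statement is the Claim_ definition above) =====
theorem get_empty_spots_list_spec : Claim_equal_get_empty_spots_list := by
  intro l _
  unfold Spec_get_empty_spots_list get_empty_spots_list get_empty_spots_list_alt
  have h := (pvLoop_main l).1 0 []
  simpa [pvFinish] using h
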